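-- pv_equiv track=rewrite | github.com/fkiliver/threaTrace | scripts/parse_darpatc_special.py | find_descendants_dfs
-- ===== SOURCE A (Python) =====
-- from typing import Dict, List, Set, Tuple
--
-- def find_descendants_dfs(start_node: str, graph_edges: Dict[str, List[str]]) -> Set[str]:
--     """
--     使用深度优先搜索查找节点的所有后代。
--
--     :param start_node: 起始节点 ID
--     :param graph_edges: 邻接表形式的图 {src: [dst1, dst2, ...]}
--     :return: 所有后代节点 ID 的集合（不包含起始节点本身）
--     """
--     descendants: Set[str] = set()
--     visited: Set[str] = set()
--     stack: List[str] = [start_node]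
--
--     while stack:
--         current = stack.pop()
--         if current in visited:
--             continue
--         visited.add(current)
--
--         # 跳过起始节点本身
--         if current != start_node:
--             descendants.add(current)
--
--         # 添加所有直接后代到栈中
--         for neighbor in graph_edges.get(current, []):
--             if neighbor not in visited:
--                 stack.append(neighbor)
--
--     return descendants
-- ===== SOURCE B (Python) =====
-- from typing import Dict, List, Set
--
-- def find_descendants_dfs(start_node: str, graph_edges: Dict[str, List[str]]) -> Set[str]:
--     """Recursive DFS: mark on entry, record every reachable node except the start."""
--     descendants: Set[str] = set()
--     visited: Set[str] = set()
--
--     def dfs(node: str) -> None: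
--         if node in visited:
--             return
--         visited.add(node)
--         if node != start_node:
--             descendants.add(node)
--         # stack-pop order; invisible in the returned set
--         for neighbor in reversed(graph_edges.get(node, [])):
--             dfs(neighbor)
--
--     dfs(start_node)
--     return descendants
-- ===== Notes on version B (the rewrite author's own statement) =====
-- stated objective: alternative
-- what changed: replaces the explicit stack/worklist loop (pop, late visited-check, push-time neighbor filtering) by a recursive DFS helper that checks visited on entry and recurses directly into neighbors
import Mathlib
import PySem

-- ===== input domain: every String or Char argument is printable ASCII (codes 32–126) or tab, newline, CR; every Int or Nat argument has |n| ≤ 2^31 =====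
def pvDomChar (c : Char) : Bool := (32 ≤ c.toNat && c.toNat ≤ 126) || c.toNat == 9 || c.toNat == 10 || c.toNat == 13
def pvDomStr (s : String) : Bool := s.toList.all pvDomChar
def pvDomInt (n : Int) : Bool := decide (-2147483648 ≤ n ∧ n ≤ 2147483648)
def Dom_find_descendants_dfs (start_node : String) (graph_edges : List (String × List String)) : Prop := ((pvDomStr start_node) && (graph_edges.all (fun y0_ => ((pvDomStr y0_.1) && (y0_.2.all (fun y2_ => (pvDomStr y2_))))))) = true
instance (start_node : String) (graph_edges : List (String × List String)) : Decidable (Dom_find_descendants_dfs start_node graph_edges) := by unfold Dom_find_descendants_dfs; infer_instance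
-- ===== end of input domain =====

-- B replaces A's explicit-stack loop by a recursive DFS with an entry visited-check
-- (alternative decomposition, same cost); the returned sets are proved equal as lists.

-- graph_edges.get(current, [])
def pvAdj (graph_edges : List (String × List String)) (k : String) : List String :=
  PySem.Dict.getD (PySem.Dict.mk graph_edges) k []

-- every node id that can ever be visited (start, keys, neighbor values); used only as a
-- termination measure / recursion-depth bound, never by the algorithms' logic
def pvUniv (start_node : String) (graph_edges : List (String × List String)) : List String :=
  start_node :: graph_edges.flatMap (fun p => p.1 :: p.2)

-- cited by pvLoopA's termination proof: neighbor lists live inside pvUniv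
lemma pvAdj_subset_univ (s : String) (g : List (String × List String)) (k x : String)
    (hx : x ∈ pvAdj g k) : x ∈ pvUniv s g := by
  unfold pvAdj PySem.Dict.getD PySem.Dict.get? at hx
  cases hfind : List.find? (fun p => p.1 == k) (PySem.Dict.mk g).items with
  | none => rw [hfind] at hx; simp at hx
  | some p =>
    rw [hfind] at hx
    simp only [Option.map_some, Option.getD_some] at hx
    have hp : p ∈ g := List.mem_of_find?_eq_some hfind
    unfold pvUniv
    exact List.mem_cons_of_mem _ (List.mem_flatMap.mpr ⟨p, hp, List.mem_cons_of_mem _ hx⟩)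

-- cited by pvLoopA's termination proof: visiting a new node strictly shrinks the measure set
lemma pvVisit_card_lt (s : String) (g : List (String × List String)) (vis : PySem.Set String)
    (stack : List String) (current : String) (p : String → Bool)
    (hcur : current ∈ stack) (hnv : current ∉ vis) :
    (((pvUniv s g).toFinset ∪ (stack.dropLast ++ (pvAdj g current).filter p).toFinset) \
        (PySem.Set.add vis current).toFinset).card
      < (((pvUniv s g).toFinset ∪ stack.toFinset) \ vis.toFinset).card := by
  apply Finset.card_lt_card
  rw [Finset.ssubset_def]
  constructor
  · intro z hz
    rw [PySem.Set.add_of_not_mem hnv] at hz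
    simp only [Finset.mem_sdiff, Finset.mem_union, List.mem_toFinset, List.mem_append,
      List.mem_filter] at hz ⊢
    obtain ⟨hz1, hz2⟩ := hz
    refine ⟨?_, fun hzv => hz2 (Or.inl hzv)⟩
    rcases hz1 with hU | hrest | hadj
    · exact Or.inl hU
    · exact Or.inr (List.mem_of_mem_dropLast hrest)
    · exact Or.inl (pvAdj_subset_univ s g current z hadj.1)
  · intro hsup
    have hmem : current ∈ ((pvUniv s g).toFinset ∪ stack.toFinset) \ vis.toFinset := by
      simp only [Finset.mem_sdiff, Finset.mem_union, List.mem_toFinset]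
      exact ⟨Or.inr hcur, hnv⟩
    have := hsup hmem
    rw [PySem.Set.add_of_not_mem hnv] at this
    simp only [Finset.mem_sdiff, List.mem_toFinset, List.mem_append] at this
    exact this.2 (Or.inr (List.mem_singleton.mpr rfl))

-- ===== PORT A =====
-- the while-stack loop: pop from the end, skip if already visited, else mark, record
-- (unless it is the start node) and push the not-yet-visited neighbors
def pvLoopA (start_node : String) (graph_edges : List (String × List String))
    (desc vis : PySem.Set String) (stack : List String) : PySem.Set String :=
  match h : stack.getLast? with
  | none => desc
  | some current =>
    if hv : PySem.Set.contains vis current = true then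
      pvLoopA start_node graph_edges desc vis stack.dropLast
    else
      let vis' := PySem.Set.add vis current
      let desc' := if current ≠ start_node then PySem.Set.add desc current else desc
      pvLoopA start_node graph_edges desc' vis'
        (stack.dropLast ++ (pvAdj graph_edges current).filter
          (fun nb => !(PySem.Set.contains vis' nb)))
termination_by
  ((((pvUniv start_node graph_edges).toFinset ∪ stack.toFinset) \ vis.toFinset).card, stack.length)
decreasing_by
  · -- skip: first component can only shrink, the stack gets shorter
    have hne : stack ≠ [] := by intro hnil; rw [hnil] at h; simp at h
    have hle : ((((pvUniv start_node graph_edges).toFinset ∪ stack.dropLast.toFinset) \ vis.toFinset).card)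
        ≤ ((((pvUniv start_node graph_edges).toFinset ∪ stack.toFinset) \ vis.toFinset).card) := by
      apply Finset.card_le_card
      intro z hz
      simp only [Finset.mem_sdiff, Finset.mem_union, List.mem_toFinset] at hz ⊢
      exact ⟨hz.1.elim Or.inl (fun h' => Or.inr (List.mem_of_mem_dropLast h')), hz.2⟩
    have hlen : stack.dropLast.length < stack.length := by
      cases stack with
      | nil => exact absurd rfl hne
      | cons a t => simp
    rcases lt_or_eq_of_le hle with hlt | heq
    · exact Prod.Lex.left _ _ hlt
    · rw [heq]; exact Prod.Lex.right _ hlen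
  · -- visit: current is a new reachable node, the first component strictly drops
    have hne : stack ≠ [] := by intro hnil; rw [hnil] at h; simp at h
    have hcur : current ∈ stack := by
      obtain ⟨l', rfl⟩ := (List.getLast?_eq_some_iff).1 h
      simp
    have hnv : current ∉ vis := fun hmem => hv ((PySem.Set.contains_iff vis current).mpr hmem)
    exact Prod.Lex.left _ _ (pvVisit_card_lt start_node graph_edges vis stack current _ hcur hnv)

-- ===== PORT B =====
mutual
-- recursive dfs(node): return if visited, else mark, record (unless start), then recurse
-- into the reversed neighbor list; fuel only bounds the recursion depth (any fuel
-- ≥ |pvUniv| is proven sufficient below), it is not part of Source B's logic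
def pvDfsB (start_node : String) (graph_edges : List (String × List String)) (fuel : Nat)
    (node : String) (st : PySem.Set String × PySem.Set String) :
    PySem.Set String × PySem.Set String :=
  if PySem.Set.contains st.2 node = true then st
  else
    match fuel with
    | 0 => st
    | f + 1 =>
      let vis' := PySem.Set.add st.2 node
      let desc' := if node ≠ start_node then PySem.Set.add st.1 node else st.1
      pvGoB start_node graph_edges f ((pvAdj graph_edges node).reverse) (desc', vis')
termination_by (fuel, 0)
decreasing_by
  exact Prod.Lex.left _ _ (Nat.lt_succ_self _)

-- the for-loop over the (already reversed) neighbor list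
def pvGoB (start_node : String) (graph_edges : List (String × List String)) (fuel : Nat)
    (ns : List String) (st : PySem.Set String × PySem.Set String) :
    PySem.Set String × PySem.Set String :=
  match ns with
  | [] => st
  | n :: rest => pvGoB start_node graph_edges fuel rest (pvDfsB start_node graph_edges fuel n st)
termination_by (fuel, ns.length + 1)
decreasing_by
  · exact Prod.Lex.right _ (by simp only [List.length_cons]; omega)
  · exact Prod.Lex.right _ (by simp only [List.length_cons]; omega)
end

def find_descendants_dfs (start_node : String) (graph_edges : List (String × List String)) : List String :=
  pvLoopA start_node graph_edges PySem.Set.empty PySem.Set.empty [start_node]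

def find_descendants_dfs_alt (start_node : String) (graph_edges : List (String × List String)) : List String :=
  (pvDfsB start_node graph_edges (pvUniv start_node graph_edges).length start_node
    (PySem.Set.empty, PySem.Set.empty)).1

-- ===== PRECONDITION & SPEC =====
def Spec_find_descendants_dfs (start_node : String) (graph_edges : List (String × List String)) (out : List String) : Prop := out = find_descendants_dfs_alt start_node graph_edges
instance (start_node : String) (graph_edges : List (String × List String)) (out : List String) : Decidable (Spec_find_descendants_dfs start_node graph_edges out) := by unfold Spec_find_descendants_dfs; infer_instance

-- ===== CLAIM (what is proved, stated in full; the proofs are below) =====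
def Claim_equal_find_descendants_dfs : Prop := ∀ (start_node : String) (graph_edges : List (String × List String)), Dom_find_descendants_dfs start_node graph_edges → Spec_find_descendants_dfs start_node graph_edges (find_descendants_dfs start_node graph_edges)

-- ===== LEMMAS AND PROOFS =====

-- unfolding lemmas for A's loop
lemma pvLoopA_nil (s : String) (g : List (String × List String)) (d v : PySem.Set String) :
    pvLoopA s g d v [] = d := by
  rw [pvLoopA]
  rfl

lemma pvLoopA_concat_skip (s : String) (g : List (String × List String))
    (d v : PySem.Set String) (st : List String) (x : String) (hx : x ∈ v) :
    pvLoopA s g d v (st ++ [x]) = pvLoopA s g d v st := by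
  rw [pvLoopA]
  split
  · next heq => simp at heq
  · next current heq =>
      rw [List.getLast?_concat] at heq
      injection heq with h2
      subst h2
      rw [List.dropLast_concat, dif_pos ((PySem.Set.contains_iff v x).mpr hx)]

lemma pvLoopA_concat_visit (s : String) (g : List (String × List String))
    (d v : PySem.Set String) (st : List String) (x : String) (hx : x ∉ v) :
    pvLoopA s g d v (st ++ [x]) =
      pvLoopA s g (if x ≠ s then PySem.Set.add d x else d) (PySem.Set.add v x)
        (st ++ (pvAdj g x).filter (fun nb => !(PySem.Set.contains (PySem.Set.add v x) nb))) := by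
  rw [pvLoopA]
  split
  · next heq => simp at heq
  · next current heq =>
      rw [List.getLast?_concat] at heq
      injection heq with h2
      subst h2
      rw [List.dropLast_concat, dif_neg (fun hc => hx ((PySem.Set.contains_iff v x).mp hc))]

-- unfolding lemmas for B's dfs
lemma pvDfsB_skip (s : String) (g : List (String × List String)) (fuel : Nat) (x : String)
    (st : PySem.Set String × PySem.Set String) (hx : x ∈ st.2) :
    pvDfsB s g fuel x st = st := by
  rw [pvDfsB.eq_def]
  rw [if_pos ((PySem.Set.contains_iff st.2 x).mpr hx)]

lemma pvDfsB_zero (s : String) (g : List (String × List String)) (x : String)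
    (st : PySem.Set String × PySem.Set String) :
    pvDfsB s g 0 x st = st := by
  rw [pvDfsB.eq_def]
  split <;> rfl

lemma pvDfsB_visit (s : String) (g : List (String × List String)) (f : Nat) (x : String)
    (d v : PySem.Set String) (hx : x ∉ v) :
    pvDfsB s g (f + 1) x (d, v) =
      pvGoB s g f ((pvAdj g x).reverse)
        ((if x ≠ s then PySem.Set.add d x else d), PySem.Set.add v x) := by
  rw [pvDfsB.eq_def]
  rw [if_neg (fun hc => hx ((PySem.Set.contains_iff v x).mp hc))]

lemma pvGoB_nil (s : String) (g : List (String × List String)) (fuel : Nat)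
    (st : PySem.Set String × PySem.Set String) : pvGoB s g fuel [] st = st := by
  rw [pvGoB.eq_def]

lemma pvGoB_cons (s : String) (g : List (String × List String)) (fuel : Nat) (n : String)
    (rest : List String) (st : PySem.Set String × PySem.Set String) :
    pvGoB s g fuel (n :: rest) st = pvGoB s g fuel rest (pvDfsB s g fuel n st) := by
  rw [pvGoB.eq_def]

-- B's visited set only grows
lemma pvMono (s : String) (g : List (String × List String)) : ∀ fuel : Nat,
    (∀ (x : String) (st : PySem.Set String × PySem.Set String),
        ∀ z ∈ st.2, z ∈ (pvDfsB s g fuel x st).2) ∧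
    (∀ (ns : List String) (st : PySem.Set String × PySem.Set String),
        ∀ z ∈ st.2, z ∈ (pvGoB s g fuel ns st).2) := by
  intro fuel
  induction fuel using Nat.strong_induction_on with
  | _ fuel IH =>
    have hD : ∀ (x : String) (st : PySem.Set String × PySem.Set String),
        ∀ z ∈ st.2, z ∈ (pvDfsB s g fuel x st).2 := by
      intro x st z hz
      by_cases hx : x ∈ st.2
      · rw [pvDfsB_skip s g fuel x st hx]; exact hz
      · cases fuel with
        | zero => rw [pvDfsB_zero]; exact hz
        | succ f =>
          obtain ⟨d, v⟩ := st
          rw [pvDfsB_visit s g f x d v hx]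
          exact (IH f (Nat.lt_succ_self f)).2 _ _ z ((PySem.Set.mem_add v x z).mpr (Or.inl hz))
    refine ⟨hD, ?_⟩
    intro ns
    induction ns with
    | nil => intro st z hz; rw [pvGoB_nil]; exact hz
    | cons n rest ih =>
      intro st z hz
      rw [pvGoB_cons]
      exact ih _ z (hD n st z hz)

-- the two statements of the simulation induction
def pvMainP (fuel : Nat) : Prop :=
  ∀ (s : String) (g : List (String × List String)) (x : String) (st : List String)
    (d v : PySem.Set String),
    x ∈ pvUniv s g →
    ((pvUniv s g).toFinset \ v.toFinset).card ≤ fuel →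
    pvLoopA s g d v (st ++ [x]) =
      pvLoopA s g (pvDfsB s g fuel x (d, v)).1 (pvDfsB s g fuel x (d, v)).2 st

def pvAuxP (fuel : Nat) : Prop :=
  ∀ (s : String) (g : List (String × List String)) (ns st : List String)
    (d v v₀ : PySem.Set String),
    (∀ y ∈ ns, y ∈ pvUniv s g) →
    (∀ z ∈ v₀, z ∈ v) →
    ((pvUniv s g).toFinset \ v.toFinset).card ≤ fuel →
    pvLoopA s g d v (st ++ ns.filter (fun nb => !(PySem.Set.contains v₀ nb))) =
      pvLoopA s g (pvGoB s g fuel ns.reverse (d, v)).1 (pvGoB s g fuel ns.reverse (d, v)).2 st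

lemma pvMainOf (fuel : Nat) (hA : ∀ f, f < fuel → pvAuxP f) : pvMainP fuel := by
  intro s g x st d v hx hcard
  by_cases hxv : x ∈ v
  · rw [pvLoopA_concat_skip s g d v st x hxv, pvDfsB_skip s g fuel x (d, v) hxv]
  · have hxmem : x ∈ (pvUniv s g).toFinset \ v.toFinset := by
      simp only [Finset.mem_sdiff, List.mem_toFinset]; exact ⟨hx, hxv⟩
    have hpos : 0 < ((pvUniv s g).toFinset \ v.toFinset).card :=
      Finset.card_pos.mpr ⟨x, hxmem⟩
    cases fuel with
    | zero => omega
    | succ f =>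
      rw [pvLoopA_concat_visit s g d v st x hxv, pvDfsB_visit s g f x d v hxv]
      have hcard' : ((pvUniv s g).toFinset \ (PySem.Set.add v x).toFinset).card ≤ f := by
        rw [PySem.Set.add_of_not_mem hxv]
        have hset : (pvUniv s g).toFinset \ (v ++ [x]).toFinset
            = ((pvUniv s g).toFinset \ v.toFinset).erase x := by
          ext z
          simp only [Finset.mem_sdiff, List.mem_toFinset, Finset.mem_erase, List.mem_append,
            List.mem_singleton]
          tauto
        rw [hset, Finset.card_erase_of_mem hxmem]
        omega
      exact hA f (Nat.lt_succ_self f) s g (pvAdj g x) st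
        (if x ≠ s then PySem.Set.add d x else d) (PySem.Set.add v x) (PySem.Set.add v x)
        (fun y hy => pvAdj_subset_univ s g x y hy) (fun z hz => hz) hcard'

lemma pvAuxOf (fuel : Nat) (hM : pvMainP fuel) : pvAuxP fuel := by
  intro s g ns
  induction ns using List.reverseRecOn with
  | nil =>
    intro st d v v₀ _ _ _
    simp [pvGoB_nil]
  | append_singleton ns₀ y ih =>
    intro st d v v₀ hns hsub hcard
    have hy_univ : y ∈ pvUniv s g := hns y (by simp)
    have hns₀ : ∀ y' ∈ ns₀, y' ∈ pvUniv s g := fun y' h' => hns y' (by simp [h'])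
    rw [List.reverse_append, List.filter_append]
    simp only [List.reverse_singleton, List.singleton_append, pvGoB_cons]
    by_cases hyv : y ∈ v
    · -- dfs skips y, and the stack either never held y (y ∈ v₀) or pops and skips it
      rw [pvDfsB_skip s g fuel y (d, v) hyv]
      by_cases hy0 : y ∈ v₀
      · have hfy : List.filter (fun nb => !(PySem.Set.contains v₀ nb)) [y] = [] := by
          simp [hy0]
        rw [hfy, List.append_nil]
        exact ih st d v v₀ hns₀ hsub hcard
      · have hfy : List.filter (fun nb => !(PySem.Set.contains v₀ nb)) [y] = [y] := by
          simp [hy0]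
        rw [hfy, ← List.append_assoc, pvLoopA_concat_skip s g d v _ y hyv]
        exact ih st d v v₀ hns₀ hsub hcard
    · -- y is new: A pops it off the stack exactly when B's dfs enters it
      have hy0 : y ∉ v₀ := fun h' => hyv (hsub y h')
      have hfy : List.filter (fun nb => !(PySem.Set.contains v₀ nb)) [y] = [y] := by
        simp [hy0]
      rw [hfy, ← List.append_assoc,
        hM s g y (st ++ ns₀.filter (fun nb => !(PySem.Set.contains v₀ nb))) d v hy_univ hcard]
      have hmono : ∀ z ∈ v, z ∈ (pvDfsB s g fuel y (d, v)).2 :=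
        fun z hz => (pvMono s g fuel).1 y (d, v) z hz
      have hcard' : ((pvUniv s g).toFinset \ (pvDfsB s g fuel y (d, v)).2.toFinset).card ≤ fuel := by
        refine le_trans (Finset.card_le_card ?_) hcard
        apply Finset.sdiff_subset_sdiff (Finset.Subset.refl _)
        intro z hz
        simp only [List.mem_toFinset] at hz ⊢
        exact hmono z hz
      exact ih st (pvDfsB s g fuel y (d, v)).1 (pvDfsB s g fuel y (d, v)).2 v₀ hns₀
        (fun z hz => hmono z (hsub z hz)) hcard'

lemma pvMainAux : ∀ fuel : Nat, pvMainP fuel ∧ pvAuxP fuel := by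
  intro fuel
  induction fuel using Nat.strong_induction_on with
  | _ fuel IH =>
    have hM := pvMainOf fuel (fun f hf => (IH f hf).2)
    exact ⟨hM, pvAuxOf fuel hM⟩

-- ===== VERDICT (by name: the statement is the Claim_ definition above) =====
theorem find_descendants_dfs_spec : Claim_equal_find_descendants_dfs := by
  intro s g _
  unfold Spec_find_descendants_dfs find_descendants_dfs find_descendants_dfs_alt
  have h := (pvMainAux (pvUniv s g).length).1 s g s []
    PySem.Set.empty PySem.Set.empty
    (by unfold pvUniv; exact List.mem_cons_self)
    (by simpa [PySem.Set.empty] using List.toFinset_card_le (pvUniv s g))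
  rw [pvLoopA_nil] at h
  simpa using h
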